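-- pv_equiv track=rewrite | github.com/eliottcassidy2000/math | 04-computation/quiver_mutation_mechanism.py | quiver_mutate
-- ===== SOURCE A (Python) =====
-- def quiver_mutate(adj, n, k):
--     new = [row[:] for row in adj]
--     for i in range(n):
--         if i == k:
--             continue
--         for j in range(n):
--             if j == k or j == i:
--                 continue
--             if adj[i][k] and adj[k][j]:
--                 new[i][j] += 1
--     for i in range(n):
--         if i == k:
--             continue
--         new[i][k], new[k][i] = new[k][i], new[i][k]
--     for i in range(n):
--         for j in range(i+1, n):
--             cancel = min(new[i][j], new[j][i])
--             new[i][j] -= cancel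
--             new[j][i] -= cancel
--     return new
-- ===== SOURCE B (Python) =====
-- def quiver_mutate(adj, n, k):
--     # Single pass over unordered pairs i<j: each pair's two cells are computed
--     # from the original matrix by a closed form, then mutually cancelled.
--     new = [row[:] for row in adj]
--     for i in range(n):
--         for j in range(i + 1, n):
--             if i == k:
--                 a, b = adj[j][k], adj[k][j]
--             elif j == k:
--                 a, b = adj[k][i], adj[i][k]
--             else:
--                 a = adj[i][j] + (1 if adj[i][k] and adj[k][j] else 0)
--                 b = adj[j][i] + (1 if adj[j][k] and adj[k][i] else 0)
--             c = min(a, b)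
--             new[i][j] = a - c
--             new[j][i] = b - c
--     return new
-- ===== Notes on version B (the rewrite author's own statement) =====
-- stated objective: simpler
-- what changed: B replaces A's three sequential sweeps (arrow-composition pass, k-row/column swap pass, cancellation pass) by a single pass over unordered pairs i<j that computes both cells of each pair from the original matrix by a closed form and cancels them immediately.
-- outside the precondition, e.g. on quiver_mutate([[10, -2827], [6, 7]], 1, 1): A returns [[10, 6], [-2827, 7]], B returns [[10, -2827], [6, 7]]; on quiver_mutate([[1, 2], [3]], 2, 1): A returns [[1, 1], [0]], B returns [[1, 1], [0]]
import Mathlib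
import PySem

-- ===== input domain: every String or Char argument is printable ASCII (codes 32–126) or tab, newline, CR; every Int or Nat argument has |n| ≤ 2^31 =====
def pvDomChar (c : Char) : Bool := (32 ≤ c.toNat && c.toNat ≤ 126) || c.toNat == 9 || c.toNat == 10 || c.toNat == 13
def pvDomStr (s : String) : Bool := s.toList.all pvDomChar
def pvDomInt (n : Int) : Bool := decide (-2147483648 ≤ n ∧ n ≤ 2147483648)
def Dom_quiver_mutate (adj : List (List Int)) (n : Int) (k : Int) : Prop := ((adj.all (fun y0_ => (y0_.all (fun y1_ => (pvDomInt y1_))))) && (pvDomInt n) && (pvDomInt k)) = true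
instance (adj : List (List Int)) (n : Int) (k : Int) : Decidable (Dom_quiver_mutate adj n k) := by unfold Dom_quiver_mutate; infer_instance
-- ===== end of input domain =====

-- B replaces A's three sequential sweeps by one pass over unordered pairs i<j computing each
-- pair's two cells from the original matrix by a closed form (objective: simpler; same cost).


-- ===== PORT A =====
-- m[i][j] and m[i][j] = v through PySem's Python indexing (exact wherever Python indexing
-- succeeds; Pre_ guarantees every index performed is a valid non-negative one).
def pvCell (m : List (List Int)) (i j : Int) : Int :=
  PySem.List.pyGetD (PySem.List.pyGetD m i []) j 0

def pvSetCell (m : List (List Int)) (i j : Int) (v : Int) : List (List Int) :=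
  PySem.List.pySetD m i (PySem.List.pySetD (PySem.List.pyGetD m i []) j v)

def quiver_mutate (adj : List (List Int)) (n : Int) (k : Int) : List (List Int) :=
  let new0 := adj.map (fun row => row)
  let new1 := (PySem.List.pyRange 0 n 1).foldl (fun new i =>
    if i = k then new else
      (PySem.List.pyRange 0 n 1).foldl (fun new j =>
        if j = k ∨ j = i then new else
          if pvCell adj i k ≠ 0 ∧ pvCell adj k j ≠ 0 then
            pvSetCell new i j (pvCell new i j + 1)
          else new) new) new0
  let new2 := (PySem.List.pyRange 0 n 1).foldl (fun new i =>
    if i = k then new else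
      let a := pvCell new k i
      let b := pvCell new i k
      pvSetCell (pvSetCell new i k a) k i b) new1
  (PySem.List.pyRange 0 n 1).foldl (fun new i =>
    (PySem.List.pyRange (i + 1) n 1).foldl (fun new j =>
      let cancel := min (pvCell new i j) (pvCell new j i)
      let new' := pvSetCell new i j (pvCell new i j - cancel)
      pvSetCell new' j i (pvCell new' j i - cancel)) new) new2

-- ===== PORT B =====
def quiver_mutate_alt (adj : List (List Int)) (n : Int) (k : Int) : List (List Int) :=
  (PySem.List.pyRange 0 n 1).foldl (fun new i =>
    (PySem.List.pyRange (i + 1) n 1).foldl (fun new j =>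
      let ab :=
        if i = k then (pvCell adj j k, pvCell adj k j)
        else if j = k then (pvCell adj k i, pvCell adj i k)
        else (pvCell adj i j + (if pvCell adj i k ≠ 0 ∧ pvCell adj k j ≠ 0 then 1 else 0),
              pvCell adj j i + (if pvCell adj j k ≠ 0 ∧ pvCell adj k i ≠ 0 then 1 else 0))
      let c := min ab.1 ab.2
      pvSetCell (pvSetCell new i j (ab.1 - c)) j i (ab.2 - c)) new)
    (adj.map (fun row => row))

-- ===== PRECONDITION & SPEC =====
-- Pre_ excludes (a) k outside [0, n) for positive n, where A raises IndexError or its value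
-- rests on Python's negative-index wraparound (an unspecified corner), and (b) matrices not
-- covering an n×n shape, where A raises IndexError except in degenerate cases its loops skip.
def Pre_quiver_mutate (adj : List (List Int)) (n : Int) (k : Int) : Prop :=
  n ≤ 0 ∨ (0 ≤ k ∧ k < n ∧
    (n = 1 ∨ (n ≤ (adj.length : Int) ∧ ∀ row ∈ adj.take n.toNat, n ≤ (row.length : Int))))
instance (adj : List (List Int)) (n : Int) (k : Int) : Decidable (Pre_quiver_mutate adj n k) := by
  unfold Pre_quiver_mutate; infer_instance

def pvWitness_quiver_mutate : List (List Int) × Int × Int := ([[0, 1, 0], [0, 0, 1], [1, 0, 0]], 3, 0)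

def Spec_quiver_mutate (adj : List (List Int)) (n : Int) (k : Int) (out : List (List Int)) : Prop := out = quiver_mutate_alt adj n k
instance (adj : List (List Int)) (n : Int) (k : Int) (out : List (List Int)) : Decidable (Spec_quiver_mutate adj n k out) := by unfold Spec_quiver_mutate; infer_instance

-- ===== CLAIM (what is proved, stated in full; the proofs are below) =====
def Claim_equal_quiver_mutate : Prop := ∀ (adj : List (List Int)) (n : Int) (k : Int), Dom_quiver_mutate adj n k → Pre_quiver_mutate adj n k → Spec_quiver_mutate adj n k (quiver_mutate adj n k)

-- ===== LEMMAS AND PROOFS =====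

-- Nat-indexed cell access / in-place cell update, the proof-side view of pvCell / pvSetCell.
def gC (m : List (List Int)) (i j : Nat) : Int := (m.getD i []).getD j 0
def setN (m : List (List Int)) (a b : Nat) (v : Int) : List (List Int) :=
  m.set a ((m.getD a []).set b v)

theorem pvCell_cast (m : List (List Int)) (i j : Nat) : pvCell m (i : Int) (j : Int) = gC m i j := by
  simp [pvCell, gC]

theorem pvSetCell_cast (m : List (List Int)) (a b : Nat) (v : Int) :
    pvSetCell m (a : Int) (b : Int) v = setN m a b v := by
  simp [pvSetCell, setN]

theorem length_setN (m : List (List Int)) (a b : Nat) (v : Int) :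
    (setN m a b v).length = m.length := by simp [setN]

theorem getD_setN (m : List (List Int)) (a b : Nat) (v : Int) (i : Nat) :
    ((setN m a b v).getD i []) = if i = a ∧ a < m.length then (m.getD a []).set b v else m.getD i [] := by
  unfold setN
  by_cases h : i = a
  · subst h
    by_cases hl : i < m.length
    · rw [if_pos ⟨rfl, hl⟩, List.getD_eq_getElem?_getD, List.getElem?_set, if_pos rfl, if_pos hl]
      rfl
    · rw [if_neg (by rintro ⟨_, hh⟩; exact hl hh), List.getD_eq_getElem?_getD,
        List.getElem?_set, if_pos rfl, if_neg hl, List.getD_eq_getElem?_getD,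
        List.getElem?_eq_none (by omega)]
  · rw [if_neg (by rintro ⟨hh, _⟩; exact h hh), List.getD_eq_getElem?_getD,
      List.getElem?_set, if_neg (fun hh => h hh.symm), ← List.getD_eq_getElem?_getD]

theorem rowlen_setN (m : List (List Int)) (a b : Nat) (v : Int) (i : Nat) :
    ((setN m a b v).getD i []).length = (m.getD i []).length := by
  rw [getD_setN]
  split_ifs with h
  · rw [h.1]; simp
  · rfl

theorem gC_setN (m : List (List Int)) (a b : Nat) (v : Int)
    (ha : a < m.length) (hb : b < (m.getD a []).length) (i j : Nat) :
    gC (setN m a b v) i j = if i = a ∧ j = b then v else gC m i j := by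
  unfold gC
  rw [getD_setN]
  by_cases hia : i = a
  · subst hia
    rw [if_pos ⟨rfl, ha⟩]
    by_cases hjb : j = b
    · subst hjb
      rw [if_pos ⟨rfl, rfl⟩]
      simp only [List.getD_eq_getElem?_getD] at hb ⊢
      simp [hb]
    · rw [if_neg (by rintro ⟨_, hh⟩; exact hjb hh)]
      simp only [List.getD_eq_getElem?_getD]
      simp [show ¬ b = j from fun hh => hjb hh.symm]
  · rw [if_neg (by rintro ⟨hh, _⟩; exact hia hh), if_neg (by rintro ⟨hh, _⟩; exact hia hh)]

-- shape equality between two matrices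
def ShapeEq (x y : List (List Int)) : Prop :=
  x.length = y.length ∧ ∀ a, (x.getD a []).length = (y.getD a []).length

theorem shapeEq_refl (x : List (List Int)) : ShapeEq x x := ⟨rfl, fun _ => rfl⟩

theorem shapeEq_setN (adj m : List (List Int)) (a b : Nat) (v : Int) (h : ShapeEq m adj) :
    ShapeEq (setN m a b v) adj :=
  ⟨by rw [length_setN]; exact h.1, fun i => by rw [rowlen_setN]; exact h.2 i⟩

theorem eq_of_gC (x y : List (List Int)) (hl : x.length = y.length)
    (hr : ∀ a, (x.getD a []).length = (y.getD a []).length)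
    (hg : ∀ i j, gC x i j = gC y i j) : x = y := by
  apply List.ext_getElem hl
  intro a h1 h2
  have hrowl : x[a].length = y[a].length := by
    have := hr a
    rwa [List.getD_eq_getElem?_getD, List.getD_eq_getElem?_getD,
      List.getElem?_eq_getElem h1, List.getElem?_eq_getElem h2] at this
  apply List.ext_getElem hrowl
  intro b hb1 hb2
  have := hg a b
  simp only [gC, List.getD_eq_getElem?_getD, List.getElem?_eq_getElem h1,
    List.getElem?_eq_getElem h2, Option.getD_some, List.getElem?_eq_getElem hb1,
    List.getElem?_eq_getElem hb2] at this
  exact this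

-- closed-form cell values after each of A's sweeps (N = n, K = k as naturals)
def F1 (adj : List (List Int)) (N K i j : Nat) : Int :=
  gC adj i j +
    (if i < N ∧ j < N ∧ i ≠ K ∧ j ≠ K ∧ j ≠ i ∧ gC adj i K ≠ 0 ∧ gC adj K j ≠ 0 then 1 else 0)
def F2 (adj : List (List Int)) (N K i j : Nat) : Int :=
  if i < N ∧ i ≠ K ∧ j = K then F1 adj N K K i
  else if j < N ∧ j ≠ K ∧ i = K then F1 adj N K j K
  else F1 adj N K i j
def F3 (adj : List (List Int)) (N K i j : Nat) : Int :=
  if i < N ∧ j < N ∧ i ≠ j then F2 adj N K i j - min (F2 adj N K i j) (F2 adj N K j i)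
  else F2 adj N K i j

-- A's loops, named for the proofs (definitionally equal to the port's folds)
def body1 (adj : List (List Int)) (k i : Int) (s : List (List Int)) (j : Int) : List (List Int) :=
  if j = k ∨ j = i then s else
    if pvCell adj i k ≠ 0 ∧ pvCell adj k j ≠ 0 then pvSetCell s i j (pvCell s i j + 1) else s

def inner1 (adj : List (List Int)) (k i t : Int) (m : List (List Int)) : List (List Int) :=
  (PySem.List.pyRange 0 t 1).foldl (body1 adj k i) m

def loop1 (adj : List (List Int)) (k t n : Int) (m : List (List Int)) : List (List Int) :=
  (PySem.List.pyRange 0 t 1).foldl (fun s i => if i = k then s else inner1 adj k i n s) m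

def body2 (k : Int) (s : List (List Int)) (i : Int) : List (List Int) :=
  if i = k then s else pvSetCell (pvSetCell s i k (pvCell s k i)) k i (pvCell s i k)

def loop2 (k t : Int) (m : List (List Int)) : List (List Int) :=
  (PySem.List.pyRange 0 t 1).foldl (body2 k) m

def body3 (i : Int) (s : List (List Int)) (j : Int) : List (List Int) :=
  let cancel := min (pvCell s i j) (pvCell s j i)
  let s' := pvSetCell s i j (pvCell s i j - cancel)
  pvSetCell s' j i (pvCell s' j i - cancel)

def inner3 (i a t : Int) (m : List (List Int)) : List (List Int) :=
  (PySem.List.pyRange a t 1).foldl (body3 i) m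

def loop3 (t n : Int) (m : List (List Int)) : List (List Int) :=
  (PySem.List.pyRange 0 t 1).foldl (fun s i => inner3 i (i + 1) n s) m

-- B's loops, named for the proofs
def bodyB (adj : List (List Int)) (k i : Int) (s : List (List Int)) (j : Int) : List (List Int) :=
  let ab :=
    if i = k then (pvCell adj j k, pvCell adj k j)
    else if j = k then (pvCell adj k i, pvCell adj i k)
    else (pvCell adj i j + (if pvCell adj i k ≠ 0 ∧ pvCell adj k j ≠ 0 then 1 else 0),
          pvCell adj j i + (if pvCell adj j k ≠ 0 ∧ pvCell adj k i ≠ 0 then 1 else 0))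
  let c := min ab.1 ab.2
  pvSetCell (pvSetCell s i j (ab.1 - c)) j i (ab.2 - c)

def innerB (adj : List (List Int)) (k i a t : Int) (m : List (List Int)) : List (List Int) :=
  (PySem.List.pyRange a t 1).foldl (bodyB adj k i) m

def loopB (adj : List (List Int)) (k t n : Int) (m : List (List Int)) : List (List Int) :=
  (PySem.List.pyRange 0 t 1).foldl (fun s i => innerB adj k i (i + 1) n s) m

theorem A_eq_loops (adj : List (List Int)) (n k : Int) :
    quiver_mutate adj n k =
      loop3 n n (loop2 k n (loop1 adj k n n (adj.map (fun row => row)))) := rfl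

theorem B_eq_loops (adj : List (List Int)) (n k : Int) :
    quiver_mutate_alt adj n k = loopB adj k n n (adj.map (fun row => row)) := rfl

theorem inner1_char (adj : List (List Int)) (N K : Nat) (hN : N ≤ adj.length)
    (hrow : ∀ a, a < N → N ≤ (adj.getD a []).length) (i : Nat) (hi : i < N)
    (t : Nat) (ht : t ≤ N) (m : List (List Int)) (hS : ShapeEq m adj) :
    ShapeEq (inner1 adj (K : Int) (i : Int) (t : Int) m) adj ∧
      ∀ p q : Nat, gC (inner1 adj (K : Int) (i : Int) (t : Int) m) p q =
        if p = i ∧ q < t ∧ q ≠ K ∧ q ≠ i ∧ gC adj i K ≠ 0 ∧ gC adj K q ≠ 0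
        then gC m p q + 1 else gC m p q := by
  induction t with
  | zero =>
      refine ⟨by simpa [inner1, PySem.List.pyRange_one_eq_nil] using hS, ?_⟩
      intro p q; simp [inner1, PySem.List.pyRange_one_eq_nil]
  | succ t ih =>
      obtain ⟨ihS, ihg⟩ := ih (by omega)
      have hstep : inner1 adj (K : Int) (i : Int) ((t + 1 : Nat) : Int) m
          = body1 adj (K : Int) (i : Int) (inner1 adj (K : Int) (i : Int) (t : Int) m) (t : Int) := by
        unfold inner1
        rw [show ((t + 1 : Nat) : Int) = (t : Int) + 1 by push_cast; ring,
          PySem.List.pyRange_one_succ_right (by omega), List.foldl_append]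
        rfl
      rw [hstep]
      unfold body1
      by_cases h1 : (t : Int) = (K : Int) ∨ (t : Int) = (i : Int)
      · rw [if_pos h1]
        have h1' : t = K ∨ t = i := by exact_mod_cast h1
        refine ⟨ihS, ?_⟩
        intro p q
        rw [ihg p q]
        refine if_congr ⟨?_, ?_⟩ rfl rfl
        · rintro ⟨e1, e2, e3, e4, e5, e6⟩
          exact ⟨e1, by omega, e3, e4, e5, e6⟩
        · rintro ⟨e1, e2, e3, e4, e5, e6⟩
          exact ⟨e1, by rcases h1' with h | h <;> omega, e3, e4, e5, e6⟩
      · rw [if_neg h1]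
        have h1' : ¬(t = K ∨ t = i) := by
          intro h; exact h1 (by exact_mod_cast h)
        obtain ⟨htK, hti⟩ := not_or.mp h1'
        simp only [pvCell_cast]
        by_cases h2 : gC adj i K ≠ 0 ∧ gC adj K t ≠ 0
        · rw [if_pos h2]
          have hilen : i < (inner1 adj (K : Int) (i : Int) (t : Int) m).length := by
            rw [ihS.1]; omega
          have hirow : t < ((inner1 adj (K : Int) (i : Int) (t : Int) m).getD i []).length := by
            rw [ihS.2 i]; have := hrow i hi; omega
          simp only [pvSetCell_cast]
          refine ⟨shapeEq_setN adj _ i t _ ihS, ?_⟩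
          intro p q
          rw [gC_setN _ i t _ hilen hirow p q]
          by_cases hpq : p = i ∧ q = t
          · rw [if_pos hpq]
            obtain ⟨hp, hq⟩ := hpq; subst hp; subst hq
            rw [if_pos ⟨rfl, by omega, htK, hti, h2.1, h2.2⟩, ihg p q,
              if_neg (by rintro ⟨e1, e2, e3, e4, e5, e6⟩; omega)]
          · rw [if_neg hpq, ihg p q]
            refine if_congr ⟨?_, ?_⟩ rfl rfl
            · rintro ⟨e1, e2, e3, e4, e5, e6⟩
              exact ⟨e1, by omega, e3, e4, e5, e6⟩
            · rintro ⟨e1, e2, e3, e4, e5, e6⟩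
              have hq : q ≠ t := fun hh => hpq ⟨e1, hh⟩
              exact ⟨e1, by omega, e3, e4, e5, e6⟩
        · rw [if_neg h2]
          refine ⟨ihS, ?_⟩
          intro p q
          rw [ihg p q]
          refine if_congr ⟨?_, ?_⟩ rfl rfl
          · rintro ⟨e1, e2, e3, e4, e5, e6⟩
            exact ⟨e1, by omega, e3, e4, e5, e6⟩
          · rintro ⟨e1, e2, e3, e4, e5, e6⟩
            by_cases hq : q = t
            · subst hq; exact absurd ⟨e5, e6⟩ h2
            · exact ⟨e1, by omega, e3, e4, e5, e6⟩

theorem loop1_char (adj : List (List Int)) (N K : Nat) (hN : N ≤ adj.length)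
    (hrow : ∀ a, a < N → N ≤ (adj.getD a []).length)
    (t : Nat) (ht : t ≤ N) (m : List (List Int)) (hS : ShapeEq m adj) :
    ShapeEq (loop1 adj (K : Int) (t : Int) (N : Int) m) adj ∧
      ∀ p q : Nat, gC (loop1 adj (K : Int) (t : Int) (N : Int) m) p q =
        if p < t ∧ q < N ∧ p ≠ K ∧ q ≠ K ∧ q ≠ p ∧ gC adj p K ≠ 0 ∧ gC adj K q ≠ 0
        then gC m p q + 1 else gC m p q := by
  induction t with
  | zero =>
      refine ⟨by simpa [loop1, PySem.List.pyRange_one_eq_nil] using hS, ?_⟩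
      intro p q; simp [loop1, PySem.List.pyRange_one_eq_nil]
  | succ t ih =>
      obtain ⟨ihS, ihg⟩ := ih (by omega)
      have hstep : loop1 adj (K : Int) ((t + 1 : Nat) : Int) (N : Int) m
          = if (t : Int) = (K : Int) then loop1 adj (K : Int) (t : Int) (N : Int) m
            else inner1 adj (K : Int) (t : Int) (N : Int) (loop1 adj (K : Int) (t : Int) (N : Int) m) := by
        unfold loop1
        rw [show ((t + 1 : Nat) : Int) = (t : Int) + 1 by push_cast; ring,
          PySem.List.pyRange_one_succ_right (by omega), List.foldl_append]
        rfl
      rw [hstep]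
      by_cases h1 : (t : Int) = (K : Int)
      · rw [if_pos h1]
        have h1' : t = K := by exact_mod_cast h1
        refine ⟨ihS, ?_⟩
        intro p q
        rw [ihg p q]
        refine if_congr ⟨?_, ?_⟩ rfl rfl
        · rintro ⟨e1, e2, e3, e4, e5, e6, e7⟩
          exact ⟨by omega, e2, e3, e4, e5, e6, e7⟩
        · rintro ⟨e1, e2, e3, e4, e5, e6, e7⟩
          exact ⟨by omega, e2, e3, e4, e5, e6, e7⟩
      · rw [if_neg h1]
        have h1' : t ≠ K := by intro h; exact h1 (by exact_mod_cast h)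
        have htN : t < N := by omega
        obtain ⟨jS, jg⟩ := inner1_char adj N K hN hrow t htN N (le_refl N) _ ihS
        refine ⟨jS, ?_⟩
        intro p q
        rw [jg p q]
        by_cases hpt : p = t
        · subst hpt
          by_cases hc : q < N ∧ q ≠ K ∧ q ≠ p ∧ gC adj p K ≠ 0 ∧ gC adj K q ≠ 0
          · obtain ⟨c1, c2, c3, c4, c5⟩ := hc
            rw [if_pos ⟨rfl, c1, c2, c3, c4, c5⟩, ihg p q,
              if_neg (by rintro ⟨e1, _⟩; omega),
              if_pos ⟨by omega, c1, h1', c2, c3, c4, c5⟩]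
          · rw [if_neg (by rintro ⟨_, e2, e3, e4, e5, e6⟩; exact hc ⟨e2, e3, e4, e5, e6⟩),
              ihg p q,
              if_neg (by rintro ⟨e1, _⟩; omega),
              if_neg (by rintro ⟨f1, f2, f3, f4, f5, f6, f7⟩; exact hc ⟨f2, f4, f5, f6, f7⟩)]
        · rw [if_neg (by rintro ⟨e1, _⟩; exact hpt e1), ihg p q]
          refine if_congr ⟨?_, ?_⟩ rfl rfl
          · rintro ⟨e1, e2, e3, e4, e5, e6, e7⟩
            exact ⟨by omega, e2, e3, e4, e5, e6, e7⟩
          · rintro ⟨e1, e2, e3, e4, e5, e6, e7⟩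
            exact ⟨by omega, e2, e3, e4, e5, e6, e7⟩

theorem loop2_char (adj : List (List Int)) (N K : Nat) (hK : K < N) (hN : N ≤ adj.length)
    (hrow : ∀ a, a < N → N ≤ (adj.getD a []).length)
    (t : Nat) (ht : t ≤ N) (m : List (List Int)) (hS : ShapeEq m adj) :
    ShapeEq (loop2 (K : Int) (t : Int) m) adj ∧
      ∀ p q : Nat, gC (loop2 (K : Int) (t : Int) m) p q =
        if p < t ∧ p ≠ K ∧ q = K then gC m K p
        else if q < t ∧ q ≠ K ∧ p = K then gC m q K
        else gC m p q := by
  induction t with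
  | zero =>
      refine ⟨by simpa [loop2, PySem.List.pyRange_one_eq_nil] using hS, ?_⟩
      intro p q; simp [loop2, PySem.List.pyRange_one_eq_nil]
  | succ t ih =>
      obtain ⟨ihS, ihg⟩ := ih (by omega)
      have hstep : loop2 (K : Int) ((t + 1 : Nat) : Int) m
          = body2 (K : Int) (loop2 (K : Int) (t : Int) m) (t : Int) := by
        unfold loop2
        rw [show ((t + 1 : Nat) : Int) = (t : Int) + 1 by push_cast; ring,
          PySem.List.pyRange_one_succ_right (by omega), List.foldl_append]
        rfl
      rw [hstep]
      unfold body2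
      by_cases h1 : (t : Int) = (K : Int)
      · rw [if_pos h1]
        have h1' : t = K := by exact_mod_cast h1
        refine ⟨ihS, ?_⟩
        intro p q
        rw [ihg p q]
        refine if_congr ⟨?_, ?_⟩ rfl (if_congr ⟨?_, ?_⟩ rfl rfl)
        · rintro ⟨e1, e2, e3⟩; exact ⟨by omega, e2, e3⟩
        · rintro ⟨e1, e2, e3⟩; exact ⟨by omega, e2, e3⟩
        · rintro ⟨e1, e2, e3⟩; exact ⟨by omega, e2, e3⟩
        · rintro ⟨e1, e2, e3⟩; exact ⟨by omega, e2, e3⟩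
      · rw [if_neg h1]
        have h1' : t ≠ K := by intro h; exact h1 (by exact_mod_cast h)
        have htN : t < N := by omega
        set s := loop2 (K : Int) (t : Int) m with hsdef
        have ha : gC s K t = gC m K t := by
          rw [ihg K t]
          rw [if_neg (by rintro ⟨_, e2, _⟩; exact e2 rfl),
            if_neg (by rintro ⟨e1, _⟩; omega)]
        have hb : gC s t K = gC m t K := by
          rw [ihg t K]
          rw [if_neg (by rintro ⟨e1, _⟩; omega),
            if_neg (by rintro ⟨_, e2, _⟩; exact e2 rfl)]
        have hlen1 : t < s.length := by rw [ihS.1]; omega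
        have hrow1 : K < (s.getD t []).length := by rw [ihS.2 t]; have := hrow t htN; omega
        simp only [pvCell_cast, pvSetCell_cast]
        have hSset : ShapeEq (setN s t K (gC s K t)) adj := shapeEq_setN adj s t K _ ihS
        have hlen2 : K < (setN s t K (gC s K t)).length := by rw [hSset.1]; omega
        have hrow2 : t < ((setN s t K (gC s K t)).getD K []).length := by
          rw [hSset.2 K]; have := hrow K hK; omega
        refine ⟨shapeEq_setN adj _ K t _ hSset, ?_⟩
        intro p q
        rw [gC_setN _ K t _ hlen2 hrow2 p q]
        by_cases hKt : p = K ∧ q = t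
        · rw [if_pos hKt]
          obtain ⟨hp, hq⟩ := hKt; subst hp; subst hq
          rw [if_neg (by rintro ⟨e1, e2, _⟩; omega),
            if_pos ⟨by omega, h1', rfl⟩, hb]
        · rw [if_neg hKt, gC_setN s t K _ hlen1 hrow1 p q]
          by_cases htK2 : p = t ∧ q = K
          · rw [if_pos htK2]
            obtain ⟨hp, hq⟩ := htK2; subst hp; subst hq
            rw [if_pos ⟨by omega, h1', rfl⟩, ha]
          · rw [if_neg htK2, ihg p q]
            refine if_congr ⟨?_, ?_⟩ rfl (if_congr ⟨?_, ?_⟩ rfl rfl)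
            · rintro ⟨e1, e2, e3⟩; exact ⟨by omega, e2, e3⟩
            · rintro ⟨e1, e2, e3⟩
              have hpt : p ≠ t := fun hh => htK2 ⟨hh, e3⟩
              exact ⟨by omega, e2, e3⟩
            · rintro ⟨e1, e2, e3⟩; exact ⟨by omega, e2, e3⟩
            · rintro ⟨e1, e2, e3⟩
              have hqt : q ≠ t := fun hh => hKt ⟨e3, hh⟩
              exact ⟨by omega, e2, e3⟩

theorem inner3_char (adj : List (List Int)) (N : Nat) (hN : N ≤ adj.length)
    (hrow : ∀ a, a < N → N ≤ (adj.getD a []).length) (i : Nat) (hi : i < N)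
    (d : Nat) (hd : i + 1 + d ≤ N) (m : List (List Int)) (hS : ShapeEq m adj) :
    ShapeEq (inner3 (i : Int) ((i : Int) + 1) ((i + 1 + d : Nat) : Int) m) adj ∧
      ∀ p q : Nat, gC (inner3 (i : Int) ((i : Int) + 1) ((i + 1 + d : Nat) : Int) m) p q =
        if p = i ∧ i < q ∧ q < i + 1 + d then gC m i q - min (gC m i q) (gC m q i)
        else if q = i ∧ i < p ∧ p < i + 1 + d then gC m p i - min (gC m i p) (gC m p i)
        else gC m p q := by
  induction d with
  | zero =>
      have hnil : PySem.List.pyRange ((i : Int) + 1) ((i + 1 + 0 : Nat) : Int) 1 = [] :=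
        PySem.List.pyRange_one_eq_nil (by push_cast; omega)
      refine ⟨by simpa [inner3, hnil] using hS, ?_⟩
      intro p q
      unfold inner3
      rw [hnil]
      simp only [List.foldl_nil]
      rw [if_neg (by rintro ⟨_, e2, e3⟩; omega), if_neg (by rintro ⟨_, e2, e3⟩; omega)]
  | succ d ih =>
      obtain ⟨ihS, ihg⟩ := ih (by omega)
      have hstep : inner3 (i : Int) ((i : Int) + 1) ((i + 1 + (d + 1) : Nat) : Int) m
          = body3 (i : Int) (inner3 (i : Int) ((i : Int) + 1) ((i + 1 + d : Nat) : Int) m)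
              ((i + 1 + d : Nat) : Int) := by
        unfold inner3
        rw [show ((i + 1 + (d + 1) : Nat) : Int) = ((i + 1 + d : Nat) : Int) + 1 by push_cast; ring,
          PySem.List.pyRange_one_succ_right (by push_cast; omega), List.foldl_append]
        rfl
      rw [hstep]
      set e := i + 1 + d with hedef
      have hie : i < e := by omega
      have heN : e < N := by omega
      set s := inner3 (i : Int) ((i : Int) + 1) ((e : Nat) : Int) m with hsdef
      unfold body3
      have hre1 : gC s i e = gC m i e := by
        rw [ihg i e, if_neg (by rintro ⟨_, _, e3⟩; omega),
          if_neg (by rintro ⟨e1, _⟩; omega)]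
      have hre2 : gC s e i = gC m e i := by
        rw [ihg e i, if_neg (by rintro ⟨e1, _⟩; omega),
          if_neg (by rintro ⟨_, _, e3⟩; omega)]
      have hlen1 : i < s.length := by rw [ihS.1]; omega
      have hrow1 : e < (s.getD i []).length := by rw [ihS.2 i]; have := hrow i hi; omega
      simp only [pvCell_cast, pvSetCell_cast]
      rw [hre1, hre2]
      set c := min (gC m i e) (gC m e i) with hcdef
      set s' := setN s i e (gC m i e - c) with hs'def
      have hS' : ShapeEq s' adj := shapeEq_setN adj s i e _ ihS
      have hlen2 : e < s'.length := by rw [hS'.1]; omega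
      have hrow2 : i < (s'.getD e []).length := by rw [hS'.2 e]; have := hrow e heN; omega
      have hre3 : gC s' e i = gC m e i := by
        rw [hs'def, gC_setN s i e _ hlen1 hrow1 e i,
          if_neg (by rintro ⟨e1, _⟩; omega), hre2]
      rw [hre3]
      refine ⟨shapeEq_setN adj s' e i _ hS', ?_⟩
      intro p q
      rw [gC_setN s' e i _ hlen2 hrow2 p q, hs'def, gC_setN s i e _ hlen1 hrow1 p q, ihg p q]
      by_cases h1 : p = e ∧ q = i
      · rw [if_pos h1]
        obtain ⟨hp, hq⟩ := h1; subst hp; subst hq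
        rw [if_neg (by rintro ⟨e1, _⟩; omega),
          if_pos ⟨rfl, by omega, by omega⟩]
      · rw [if_neg h1]
        by_cases h2 : p = i ∧ q = e
        · rw [if_pos h2]
          obtain ⟨hp, hq⟩ := h2; subst hp; subst hq
          rw [if_pos ⟨rfl, by omega, by omega⟩]
        · rw [if_neg h2]
          refine if_congr ⟨?_, ?_⟩ rfl (if_congr ⟨?_, ?_⟩ rfl rfl)
          · rintro ⟨e1, e2, e3⟩; exact ⟨e1, e2, by omega⟩
          · rintro ⟨e1, e2, e3⟩
            have hq : q ≠ e := fun hh => h2 ⟨e1, hh⟩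
            exact ⟨e1, e2, by omega⟩
          · rintro ⟨e1, e2, e3⟩; exact ⟨e1, e2, by omega⟩
          · rintro ⟨e1, e2, e3⟩
            have hp : p ≠ e := fun hh => h1 ⟨hh, e1⟩
            exact ⟨e1, e2, by omega⟩

theorem loop3_char (adj : List (List Int)) (N : Nat) (hN : N ≤ adj.length)
    (hrow : ∀ a, a < N → N ≤ (adj.getD a []).length)
    (t : Nat) (ht : t ≤ N) (m : List (List Int)) (hS : ShapeEq m adj) :
    ShapeEq (loop3 (t : Int) (N : Int) m) adj ∧
      ∀ p q : Nat, gC (loop3 (t : Int) (N : Int) m) p q =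
        if p < N ∧ q < N ∧ p ≠ q ∧ min p q < t then gC m p q - min (gC m p q) (gC m q p)
        else gC m p q := by
  induction t with
  | zero =>
      refine ⟨by simpa [loop3, PySem.List.pyRange_one_eq_nil] using hS, ?_⟩
      intro p q; simp [loop3, PySem.List.pyRange_one_eq_nil]
  | succ t ih =>
      obtain ⟨ihS, ihg⟩ := ih (by omega)
      have htN : t < N := by omega
      have hstep : loop3 ((t + 1 : Nat) : Int) (N : Int) m
          = inner3 (t : Int) ((t : Int) + 1) (N : Int) (loop3 (t : Int) (N : Int) m) := by
        unfold loop3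
        rw [show ((t + 1 : Nat) : Int) = (t : Int) + 1 by push_cast; ring,
          PySem.List.pyRange_one_succ_right (by omega), List.foldl_append]
        rfl
      rw [hstep]
      set s := loop3 (t : Int) (N : Int) m with hsdef
      have hcast : ((N : Nat) : Int) = ((t + 1 + (N - t - 1) : Nat) : Int) := by push_cast; omega
      obtain ⟨jS, jg⟩ := inner3_char adj N hN hrow t htN (N - t - 1) (by omega) s ihS
      rw [hcast]
      refine ⟨jS, ?_⟩
      intro p q
      rw [jg p q]
      have hNt : t + 1 + (N - t - 1) = N := by omega
      rw [hNt]
      have hsv : ∀ a b : Nat, ((a = t ∧ t < b ∧ b < N) ∨ (b = t ∧ t < a ∧ a < N)) → gC s a b = gC m a b := by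
        intro a b hab
        rw [ihg a b, if_neg (by rintro ⟨e1, e2, e3, e4⟩; rcases hab with ⟨f1, f2, f3⟩ | ⟨f1, f2, f3⟩ <;> omega)]
      by_cases h1 : p = t ∧ t < q ∧ q < N
      · rw [if_pos h1]
        obtain ⟨hp, hq1, hq2⟩ := h1; subst hp
        rw [hsv p q (Or.inl ⟨rfl, by omega, by omega⟩), hsv q p (Or.inr ⟨rfl, by omega, by omega⟩),
          if_pos ⟨by omega, by omega, by omega, by omega⟩]
      · rw [if_neg h1]
        by_cases h2 : q = t ∧ t < p ∧ p < N
        · rw [if_pos h2]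
          obtain ⟨hq, hp1, hp2⟩ := h2; subst hq
          rw [hsv p q (Or.inr ⟨rfl, by omega, by omega⟩), hsv q p (Or.inl ⟨rfl, by omega, by omega⟩),
            if_pos ⟨by omega, by omega, by omega, by omega⟩, min_comm (gC m q p) (gC m p q)]
        · rw [if_neg h2, ihg p q]
          refine if_congr ⟨?_, ?_⟩ rfl rfl
          · rintro ⟨e1, e2, e3, e4⟩; exact ⟨e1, e2, e3, by omega⟩
          · rintro ⟨e1, e2, e3, e4⟩
            refine ⟨e1, e2, e3, ?_⟩
            rcases Nat.lt_or_ge (min p q) t with h | h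
            · exact h
            · exfalso
              rcases Nat.lt_or_ge p q with hh | hh
              · exact h1 ⟨by omega, by omega, by omega⟩
              · exact h2 ⟨by omega, by omega, by omega⟩

-- the two cell values B computes for the pair (i, j), i < j, before cancellation
def valA (adj : List (List Int)) (K i j : Nat) : Int :=
  if i = K then gC adj j K
  else if j = K then gC adj K i
  else gC adj i j + (if gC adj i K ≠ 0 ∧ gC adj K j ≠ 0 then 1 else 0)

def valB (adj : List (List Int)) (K i j : Nat) : Int :=
  if i = K then gC adj K j
  else if j = K then gC adj i K
  else gC adj j i + (if gC adj j K ≠ 0 ∧ gC adj K i ≠ 0 then 1 else 0)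

def BV1 (adj : List (List Int)) (K i j : Nat) : Int :=
  valA adj K i j - min (valA adj K i j) (valB adj K i j)
def BV2 (adj : List (List Int)) (K i j : Nat) : Int :=
  valB adj K i j - min (valA adj K i j) (valB adj K i j)

theorem innerB_char (adj : List (List Int)) (N K : Nat) (hN : N ≤ adj.length)
    (hrow : ∀ a, a < N → N ≤ (adj.getD a []).length) (i : Nat) (hi : i < N)
    (d : Nat) (hd : i + 1 + d ≤ N) (m : List (List Int)) (hS : ShapeEq m adj) :
    ShapeEq (innerB adj (K : Int) (i : Int) ((i : Int) + 1) ((i + 1 + d : Nat) : Int) m) adj ∧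
      ∀ p q : Nat, gC (innerB adj (K : Int) (i : Int) ((i : Int) + 1) ((i + 1 + d : Nat) : Int) m) p q =
        if p = i ∧ i < q ∧ q < i + 1 + d then BV1 adj K i q
        else if q = i ∧ i < p ∧ p < i + 1 + d then BV2 adj K i p
        else gC m p q := by
  induction d with
  | zero =>
      have hnil : PySem.List.pyRange ((i : Int) + 1) ((i + 1 + 0 : Nat) : Int) 1 = [] :=
        PySem.List.pyRange_one_eq_nil (by push_cast; omega)
      refine ⟨by simpa [innerB, hnil] using hS, ?_⟩
      intro p q
      unfold innerB
      rw [hnil]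
      simp only [List.foldl_nil]
      rw [if_neg (by rintro ⟨_, e2, e3⟩; omega), if_neg (by rintro ⟨_, e2, e3⟩; omega)]
  | succ d ih =>
      obtain ⟨ihS, ihg⟩ := ih (by omega)
      have hstep : innerB adj (K : Int) (i : Int) ((i : Int) + 1) ((i + 1 + (d + 1) : Nat) : Int) m
          = bodyB adj (K : Int) (i : Int)
              (innerB adj (K : Int) (i : Int) ((i : Int) + 1) ((i + 1 + d : Nat) : Int) m)
              ((i + 1 + d : Nat) : Int) := by
        unfold innerB
        rw [show ((i + 1 + (d + 1) : Nat) : Int) = ((i + 1 + d : Nat) : Int) + 1 by push_cast; ring,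
          PySem.List.pyRange_one_succ_right (by push_cast; omega), List.foldl_append]
        rfl
      rw [hstep]
      set e := i + 1 + d with hedef
      have hie : i < e := by omega
      have heN : e < N := by omega
      set s := innerB adj (K : Int) (i : Int) ((i : Int) + 1) ((e : Nat) : Int) m with hsdef
      unfold bodyB
      have hab : (if (i : Int) = (K : Int) then (pvCell adj (e : Int) (K : Int), pvCell adj (K : Int) (e : Int))
          else if (e : Int) = (K : Int) then (pvCell adj (K : Int) (i : Int), pvCell adj (i : Int) (K : Int))
          else (pvCell adj (i : Int) (e : Int) + (if pvCell adj (i : Int) (K : Int) ≠ 0 ∧ pvCell adj (K : Int) (e : Int) ≠ 0 then 1 else 0),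
                pvCell adj (e : Int) (i : Int) + (if pvCell adj (e : Int) (K : Int) ≠ 0 ∧ pvCell adj (K : Int) (i : Int) ≠ 0 then 1 else 0)))
          = (valA adj K i e, valB adj K i e) := by
        simp only [pvCell_cast, Int.natCast_inj, valA, valB]
        by_cases h1 : i = K
        · simp [h1]
        · by_cases h2 : e = K <;> simp [h1, h2]
      have hbody : (let ab :=
            if (i : Int) = (K : Int) then (pvCell adj (e : Int) (K : Int), pvCell adj (K : Int) (e : Int))
            else if (e : Int) = (K : Int) then (pvCell adj (K : Int) (i : Int), pvCell adj (i : Int) (K : Int))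
            else (pvCell adj (i : Int) (e : Int) + (if pvCell adj (i : Int) (K : Int) ≠ 0 ∧ pvCell adj (K : Int) (e : Int) ≠ 0 then 1 else 0),
                  pvCell adj (e : Int) (i : Int) + (if pvCell adj (e : Int) (K : Int) ≠ 0 ∧ pvCell adj (K : Int) (i : Int) ≠ 0 then 1 else 0));
          let c := min ab.1 ab.2
          pvSetCell (pvSetCell s (i : Int) (e : Int) (ab.1 - c)) (e : Int) (i : Int) (ab.2 - c))
          = pvSetCell (pvSetCell s (i : Int) (e : Int) (valA adj K i e - min (valA adj K i e) (valB adj K i e)))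
              (e : Int) (i : Int) (valB adj K i e - min (valA adj K i e) (valB adj K i e)) := by
        rw [hab]
      rw [hbody]
      simp only [pvSetCell_cast]
      have hlen1 : i < s.length := by rw [ihS.1]; omega
      have hrow1 : e < (s.getD i []).length := by rw [ihS.2 i]; have := hrow i hi; omega
      set s' := setN s i e (valA adj K i e - min (valA adj K i e) (valB adj K i e)) with hs'def
      have hS' : ShapeEq s' adj := shapeEq_setN adj s i e _ ihS
      have hlen2 : e < s'.length := by rw [hS'.1]; omega
      have hrow2 : i < ((s').getD e []).length := by rw [hS'.2 e]; have := hrow e heN; omega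
      refine ⟨shapeEq_setN adj s' e i _ hS', ?_⟩
      intro p q
      rw [gC_setN s' e i _ hlen2 hrow2 p q, hs'def, gC_setN s i e _ hlen1 hrow1 p q, ihg p q]
      by_cases h1 : p = e ∧ q = i
      · rw [if_pos h1]
        obtain ⟨hp, hq⟩ := h1; subst hp; subst hq
        rw [if_neg (by rintro ⟨e1, _⟩; omega), if_pos ⟨rfl, by omega, by omega⟩]
        rfl
      · rw [if_neg h1]
        by_cases h2 : p = i ∧ q = e
        · rw [if_pos h2]
          obtain ⟨hp, hq⟩ := h2; subst hp; subst hq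
          rw [if_pos ⟨rfl, by omega, by omega⟩]
          rfl
        · rw [if_neg h2]
          refine if_congr ⟨?_, ?_⟩ rfl (if_congr ⟨?_, ?_⟩ rfl rfl)
          · rintro ⟨e1, e2, e3⟩; exact ⟨e1, e2, by omega⟩
          · rintro ⟨e1, e2, e3⟩
            have hq : q ≠ e := fun hh => h2 ⟨e1, hh⟩
            exact ⟨e1, e2, by omega⟩
          · rintro ⟨e1, e2, e3⟩; exact ⟨e1, e2, by omega⟩
          · rintro ⟨e1, e2, e3⟩
            have hp : p ≠ e := fun hh => h1 ⟨hh, e1⟩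
            exact ⟨e1, e2, by omega⟩

theorem loopB_char (adj : List (List Int)) (N K : Nat) (hN : N ≤ adj.length)
    (hrow : ∀ a, a < N → N ≤ (adj.getD a []).length)
    (t : Nat) (ht : t ≤ N) (m : List (List Int)) (hS : ShapeEq m adj) :
    ShapeEq (loopB adj (K : Int) (t : Int) (N : Int) m) adj ∧
      ∀ p q : Nat, gC (loopB adj (K : Int) (t : Int) (N : Int) m) p q =
        if p < N ∧ q < N ∧ p ≠ q ∧ min p q < t then
          (if p < q then BV1 adj K p q else BV2 adj K q p)
        else gC m p q := by
  induction t with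
  | zero =>
      refine ⟨by simpa [loopB, PySem.List.pyRange_one_eq_nil] using hS, ?_⟩
      intro p q; simp [loopB, PySem.List.pyRange_one_eq_nil]
  | succ t ih =>
      obtain ⟨ihS, ihg⟩ := ih (by omega)
      have htN : t < N := by omega
      have hstep : loopB adj (K : Int) ((t + 1 : Nat) : Int) (N : Int) m
          = innerB adj (K : Int) (t : Int) ((t : Int) + 1) (N : Int)
              (loopB adj (K : Int) (t : Int) (N : Int) m) := by
        unfold loopB
        rw [show ((t + 1 : Nat) : Int) = (t : Int) + 1 by push_cast; ring,
          PySem.List.pyRange_one_succ_right (by omega), List.foldl_append]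
        rfl
      rw [hstep]
      set s := loopB adj (K : Int) (t : Int) (N : Int) m with hsdef
      have hcast : ((N : Nat) : Int) = ((t + 1 + (N - t - 1) : Nat) : Int) := by push_cast; omega
      obtain ⟨jS, jg⟩ := innerB_char adj N K hN hrow t htN (N - t - 1) (by omega) s ihS
      rw [hcast]
      refine ⟨jS, ?_⟩
      intro p q
      rw [jg p q]
      have hNt : t + 1 + (N - t - 1) = N := by omega
      rw [hNt]
      by_cases h1 : p = t ∧ t < q ∧ q < N
      · rw [if_pos h1]
        obtain ⟨hp, hq1, hq2⟩ := h1; subst hp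
        rw [if_pos ⟨by omega, by omega, by omega, by omega⟩, if_pos (by omega)]
      · rw [if_neg h1]
        by_cases h2 : q = t ∧ t < p ∧ p < N
        · rw [if_pos h2]
          obtain ⟨hq, hp1, hp2⟩ := h2; subst hq
          rw [if_pos ⟨by omega, by omega, by omega, by omega⟩, if_neg (by omega)]
        · rw [if_neg h2, ihg p q]
          refine if_congr ⟨?_, ?_⟩ rfl (by rfl)
          · rintro ⟨e1, e2, e3, e4⟩; exact ⟨e1, e2, e3, by omega⟩
          · rintro ⟨e1, e2, e3, e4⟩
            refine ⟨e1, e2, e3, ?_⟩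
            rcases Nat.lt_or_ge (min p q) t with h | h
            · exact h
            · exfalso
              rcases Nat.lt_or_ge p q with hh | hh
              · exact h1 ⟨by omega, by omega, by omega⟩
              · exact h2 ⟨by omega, by omega, by omega⟩

theorem valA_eq_F2 (adj : List (List Int)) (N K : Nat) (hK : K < N)
    (i j : Nat) (hij : i < j) (hj : j < N) : valA adj K i j = F2 adj N K i j := by
  have hij' : j ≠ i := by omega
  have hiN : i < N := by omega
  unfold valA F2 F1
  by_cases h1 : i = K
  · have hjK : j ≠ K := by omega
    simp [h1, hjK, hj, hK]
  · by_cases h2 : j = K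
    · subst h2
      simp [h1, hiN, hj]
    · by_cases h3 : gC adj i K ≠ 0 ∧ gC adj K j ≠ 0
      · simp [h1, h2, h3.1, h3.2, hiN, hj, hij']
      · simp [h1, h2, h3, hiN, hj, hij']

theorem valB_eq_F2 (adj : List (List Int)) (N K : Nat) (hK : K < N)
    (i j : Nat) (hij : i < j) (hj : j < N) : valB adj K i j = F2 adj N K j i := by
  have hij' : i ≠ j := by omega
  have hiN : i < N := by omega
  unfold valB F2 F1
  by_cases h1 : i = K
  · have hjK : j ≠ K := by omega
    simp [h1, hjK, hj, hK]
  · by_cases h2 : j = K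
    · subst h2
      simp [h1, hiN, hj]
    · by_cases h3 : gC adj j K ≠ 0 ∧ gC adj K i ≠ 0
      · simp [h1, h2, h3.1, h3.2, hiN, hj, hij']
      · simp [h1, h2, h3, hiN, hj, hij']

theorem F3_untouched (adj : List (List Int)) (N K : Nat) (hK : K < N) (p q : Nat)
    (h : ¬(p < N ∧ q < N ∧ p ≠ q)) : F3 adj N K p q = gC adj p q := by
  have h1 : ¬(p < N ∧ p ≠ K ∧ q = K) := by rintro ⟨a, b, c⟩; exact h ⟨a, by omega, by omega⟩
  have h2 : ¬(q < N ∧ q ≠ K ∧ p = K) := by rintro ⟨a, b, c⟩; exact h ⟨by omega, a, by omega⟩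
  have h3 : ¬(p < N ∧ q < N ∧ p ≠ K ∧ q ≠ K ∧ q ≠ p ∧ gC adj p K ≠ 0 ∧ gC adj K q ≠ 0) := by
    rintro ⟨a, b, c, d, e, _, _⟩; exact h ⟨a, b, by omega⟩
  unfold F3 F2 F1
  rw [if_neg h, if_neg h1, if_neg h2, if_neg h3]
  ring

theorem map_id_rows (adj : List (List Int)) : adj.map (fun row => row) = adj := by
  simp

theorem main_case (adj : List (List Int)) (N K : Nat) (hK : K < N) (hN : N ≤ adj.length)
    (hrow : ∀ a, a < N → N ≤ (adj.getD a []).length) :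
    quiver_mutate adj (N : Int) (K : Int) = quiver_mutate_alt adj (N : Int) (K : Int) := by
  rw [A_eq_loops, B_eq_loops, map_id_rows]
  obtain ⟨S1, g1⟩ := loop1_char adj N K hN hrow N (le_refl N) adj (shapeEq_refl adj)
  have h1 : ∀ p q, gC (loop1 adj (K : Int) (N : Int) (N : Int) adj) p q = F1 adj N K p q := by
    intro p q
    rw [g1 p q]
    unfold F1
    split_ifs with h
    · rfl
    · ring
  obtain ⟨S2, g2⟩ := loop2_char adj N K hK hN hrow N (le_refl N) _ S1
  have h2 : ∀ p q, gC (loop2 (K : Int) (N : Int) (loop1 adj (K : Int) (N : Int) (N : Int) adj)) p q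
      = F2 adj N K p q := by
    intro p q
    rw [g2 p q]
    unfold F2
    simp only [h1]
  obtain ⟨S3, g3⟩ := loop3_char adj N hN hrow N (le_refl N) _ S2
  have h3 : ∀ p q, gC (loop3 (N : Int) (N : Int)
      (loop2 (K : Int) (N : Int) (loop1 adj (K : Int) (N : Int) (N : Int) adj))) p q
      = F3 adj N K p q := by
    intro p q
    rw [g3 p q]
    simp only [h2]
    unfold F3
    refine if_congr ⟨?_, ?_⟩ rfl rfl
    · rintro ⟨e1, e2, e3, e4⟩; exact ⟨e1, e2, e3⟩
    · rintro ⟨e1, e2, e3⟩; exact ⟨e1, e2, e3, by omega⟩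
  obtain ⟨SB, gB⟩ := loopB_char adj N K hN hrow N (le_refl N) adj (shapeEq_refl adj)
  have hB : ∀ p q, gC (loopB adj (K : Int) (N : Int) (N : Int) adj) p q = F3 adj N K p q := by
    intro p q
    rw [gB p q]
    split_ifs with hA hC
    · unfold BV1
      rw [valA_eq_F2 adj N K hK p q hC hA.2.1, valB_eq_F2 adj N K hK p q hC hA.2.1]
      unfold F3
      rw [if_pos ⟨hA.1, hA.2.1, hA.2.2.1⟩]
    · have hqp : q < p := by omega
      unfold BV2
      rw [valA_eq_F2 adj N K hK q p hqp hA.1, valB_eq_F2 adj N K hK q p hqp hA.1]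
      unfold F3
      rw [if_pos ⟨hA.1, hA.2.1, hA.2.2.1⟩, min_comm (F2 adj N K q p) (F2 adj N K p q)]
    · rw [F3_untouched adj N K hK p q (by rintro ⟨e1, e2, e3⟩; exact hA ⟨e1, e2, e3, by omega⟩)]
  exact eq_of_gC _ _ (by rw [S3.1, SB.1]) (fun a => by rw [S3.2 a, SB.2 a])
    (fun p q => by rw [h3 p q, hB p q])

-- ===== VERDICT (by name: the statement is the Claim_ definition above) =====
theorem quiver_mutate_spec : Claim_equal_quiver_mutate := by
  unfold Claim_equal_quiver_mutate
  intro adj n k hDom hPre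
  unfold Spec_quiver_mutate
  rcases hPre with hn | ⟨hk0, hkn, hrest⟩
  · rw [A_eq_loops, B_eq_loops]
    simp [loop1, loop2, loop3, loopB, PySem.List.pyRange_one_eq_nil hn]
  · rcases hrest with h1 | ⟨hNlen, hrows⟩
    · subst h1
      have hk : k = 0 := by omega
      subst hk
      rw [A_eq_loops, B_eq_loops]
      simp [loop1, loop2, loop3, loopB, inner1, inner3, innerB, body1, body2,
        show PySem.List.pyRange 0 1 1 = [0] from by decide,
        show PySem.List.pyRange 1 1 1 = [] from by decide]
    · obtain ⟨N, rfl⟩ : ∃ N : Nat, n = (N : Int) := ⟨n.toNat, by omega⟩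
      obtain ⟨K, rfl⟩ : ∃ K : Nat, k = (K : Int) := ⟨k.toNat, by omega⟩
      have hK : K < N := by omega
      have hN : N ≤ adj.length := by exact_mod_cast hNlen
      have hrow : ∀ a, a < N → N ≤ (adj.getD a []).length := by
        intro a ha
        have haN : a < adj.length := by omega
        have hlt : a < (adj.take ((N : Int).toNat)).length := by
          simp [List.length_take]; omega
        have hmem : adj[a] ∈ adj.take ((N : Int).toNat) := by
          have : (adj.take ((N : Int).toNat))[a] = adj[a] := List.getElem_take
          exact this ▸ List.getElem_mem hlt
        have := hrows _ hmem
        have hgd : adj.getD a [] = adj[a] := List.getD_eq_getElem adj [] haN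
        rw [hgd]
        omega
      exact main_case adj N K hK hN hrow
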